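-- pv_equiv track=rewrite | github.com/RaviSoni804426/Coding2 | online contest/money.py | maximum_money_accumulated
-- ===== SOURCE A (Python) =====
-- def maximum_money_accumulated(x, y):
--     for i in range(1,y+1):
--
--      while y > 0:
--         if x >= 1000:
--
--             x *= 2
--         else:
--             x += 1000
--         y -= 1
--     return x
-- ===== SOURCE B (Python) =====
-- def maximum_money_accumulated(x, y):
--     # Closed form: count the add-1000 steps needed until x >= 1000 (capped at y),
--     # then double for the remaining steps.
--     if y <= 0:
--         return x
--     k = 0 if x >= 1000 else min(y, -((x - 1000) // 1000))
--     return (x + 1000 * k) << (y - k)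
-- ===== Notes on version B (the rewrite author's own statement) =====
-- stated objective: faster
-- what changed: Replaced the y-iteration loop (inside a redundant for-loop) by a closed form: compute the number k of add-1000 steps needed to reach 1000 (capped at y) with ceiling division, then shift left by the remaining y-k doubling steps; intended as faster (O(1) arithmetic ops vs O(y) iterations), measured 511.66x at the largest size both finished (n=65536).
import Mathlib
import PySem

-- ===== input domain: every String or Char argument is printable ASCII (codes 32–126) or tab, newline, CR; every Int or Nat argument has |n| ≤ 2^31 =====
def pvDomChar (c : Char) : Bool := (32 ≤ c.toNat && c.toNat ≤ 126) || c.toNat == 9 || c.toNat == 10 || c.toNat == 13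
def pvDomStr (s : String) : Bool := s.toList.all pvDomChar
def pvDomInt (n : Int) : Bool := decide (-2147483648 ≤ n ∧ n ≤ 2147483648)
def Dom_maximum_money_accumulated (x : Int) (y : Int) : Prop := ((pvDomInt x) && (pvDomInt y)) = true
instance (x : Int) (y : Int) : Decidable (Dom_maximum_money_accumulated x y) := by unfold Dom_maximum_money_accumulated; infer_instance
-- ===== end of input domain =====

-- B replaces A's y-iteration while loop with an O(1) closed form (count add-steps, then one power of two); equivalence of the return values is proved for all ints.

-- ===== PORT A =====
-- the inner 'while y > 0' loop, mutating (x, y)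
def pvWhileA (x : Int) (y : Int) : Int × Int :=
  if h : y > 0 then
    pvWhileA (if x ≥ 1000 then x * 2 else x + 1000) (y - 1)
  else (x, y)
termination_by y.toNat
decreasing_by omega

def maximum_money_accumulated (x : Int) (y : Int) : Int :=
  ((PySem.List.pyRange 1 (y + 1) 1).foldl
    (fun (s : Int × Int) (_ : Int) => pvWhileA s.1 s.2) (x, y)).1

-- ===== PORT B =====
def maximum_money_accumulated_alt (x : Int) (y : Int) : Int :=
  if y ≤ 0 then x
  else
    let k : Int := if x ≥ 1000 then 0 else min y (-(PySem.Int.floordiv (x - 1000) 1000))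
    (x + 1000 * k) * 2 ^ (y - k).toNat

-- ===== PRECONDITION & SPEC =====
def Spec_maximum_money_accumulated (x : Int) (y : Int) (out : Int) : Prop := out = maximum_money_accumulated_alt x y
instance (x : Int) (y : Int) (out : Int) : Decidable (Spec_maximum_money_accumulated x y out) := by unfold Spec_maximum_money_accumulated; infer_instance

-- ===== CLAIM =====
def Claim_equal_maximum_money_accumulated : Prop := ∀ (x : Int) (y : Int), Dom_maximum_money_accumulated x y → Spec_maximum_money_accumulated x y (maximum_money_accumulated x y)

-- ===== LEMMAS AND PROOFS =====
lemma pvWhileA_nonpos (x y : Int) (h : ¬ y > 0) : pvWhileA x y = (x, y) := by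
  rw [pvWhileA]; simp [h]

lemma pvWhileA_snd (x y : Int) (h : y > 0) : (pvWhileA x y).2 = 0 := by
  generalize hn : y.toNat = n
  induction n generalizing x y with
  | zero => omega
  | succ n ih =>
    rw [pvWhileA]; simp only [h, dite_true]
    by_cases h1 : y - 1 > 0
    · exact ih _ _ h1 (by omega)
    · rw [pvWhileA_nonpos _ _ h1]; omega

-- one step of the loop agrees with the closed form
lemma alt_step (x y : Int) (hy : 1 < y) :
    maximum_money_accumulated_alt (if x ≥ 1000 then x * 2 else x + 1000) (y - 1)
      = maximum_money_accumulated_alt x y := by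
  have hfd : PySem.Int.floordiv (x - 1000) 1000 = (x - 1000) / 1000 :=
    PySem.Int.floordiv_eq_ediv_of_pos (by norm_num)
  have hfd' : PySem.Int.floordiv (x + 1000 - 1000) 1000 = (x + 1000 - 1000) / 1000 :=
    PySem.Int.floordiv_eq_ediv_of_pos (by norm_num)
  unfold maximum_money_accumulated_alt
  by_cases hx : x ≥ 1000
  · simp only [hx, if_true, hfd]
    have h2 : x * 2 ≥ 1000 := by omega
    simp only [h2, if_true, if_neg (by omega : ¬ y - 1 ≤ 0), if_neg (by omega : ¬ y ≤ 0)]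
    have hm : (y - 0).toNat = (y - 1 - 0).toNat + 1 := by omega
    rw [hm, pow_succ]; ring
  · simp only [hx, if_false, hfd]
    by_cases hx0 : 0 ≤ x
    · -- one add reaches ≥ 1000
      have hc : (x - 1000) / 1000 = -1 := by omega
      have h2 : x + 1000 ≥ 1000 := by omega
      simp only [h2, if_true, if_neg (by omega : ¬ y - 1 ≤ 0), if_neg (by omega : ¬ y ≤ 0), hc]
      have hk : min y (-(-1 : Int)) = 1 := by omega
      rw [hk]
      have hm : (y - 1 - 0).toNat = (y - 1).toNat := by omega
      rw [hm]; ring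
    · -- still below 0 after knowing x < 0
      have h2 : ¬ x + 1000 ≥ 1000 := by omega
      simp only [h2, if_false, hfd',
        if_neg (by omega : ¬ y - 1 ≤ 0), if_neg (by omega : ¬ y ≤ 0)]
      set c : Int := -((x - 1000) / 1000) with hcdef
      have hc2 : 2 ≤ c := by omega
      have hcs : -((x + 1000 - 1000) / 1000) = c - 1 := by omega
      rw [hcs]
      have hk' : min (y - 1) (c - 1) = min y c - 1 := by omega
      rw [hk']
      have hkle : min y c ≤ y := by omega
      have hm : (y - 1 - (min y c - 1)).toNat = (y - min y c).toNat := by omega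
      rw [hm]; ring

lemma pvWhileA_fst (x y : Int) (h : y > 0) :
    (pvWhileA x y).1 = maximum_money_accumulated_alt x y := by
  generalize hn : y.toNat = n
  induction n generalizing x y with
  | zero => omega
  | succ n ih =>
    rw [pvWhileA]; simp only [h, dite_true]
    by_cases h1 : y - 1 > 0
    · rw [ih _ _ h1 (by omega)]
      exact alt_step x y (by omega)
    · -- y = 1
      have hy1 : y = 1 := by omega
      subst hy1
      rw [pvWhileA_nonpos _ _ (by omega)]
      have hfd : PySem.Int.floordiv (x - 1000) 1000 = (x - 1000) / 1000 :=
        PySem.Int.floordiv_eq_ediv_of_pos (by norm_num)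
      unfold maximum_money_accumulated_alt
      by_cases hx : x ≥ 1000
      · simp [hx]
      · have hc : 1 ≤ -((x - 1000) / 1000) := by omega
        simp only [hx, if_false, if_neg (by norm_num : ¬ (1:Int) ≤ 0), hfd]
        have hk : min (1:Int) (-((x - 1000) / 1000)) = 1 := by omega
        rw [hk]; norm_num

lemma foldl_fixed (x : Int) (l : List Int) :
    (l.foldl (fun (s : Int × Int) (_ : Int) => pvWhileA s.1 s.2) (x, 0)).1 = x := by
  induction l generalizing x with
  | nil => rfl
  | cons a l ih =>
    simp only [List.foldl_cons]
    rw [pvWhileA_nonpos x 0 (by omega)]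
    exact ih x

-- ===== VERDICT =====
theorem maximum_money_accumulated_spec : Claim_equal_maximum_money_accumulated := by
  intro x y _
  unfold Spec_maximum_money_accumulated maximum_money_accumulated
  by_cases hy : y > 0
  · rw [PySem.List.pyRange_one_cons (by omega : (1:Int) < y + 1)]
    simp only [List.foldl_cons]
    have h2 := pvWhileA_snd x y hy
    have hpair : pvWhileA x y = ((pvWhileA x y).1, (0:Int)) := by
      rw [← h2]
    rw [hpair, foldl_fixed, pvWhileA_fst x y hy]
  · rw [PySem.List.pyRange_one_eq_nil (by omega : y + 1 ≤ 1)]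
    simp only [List.foldl_nil]
    unfold maximum_money_accumulated_alt
    simp [show y ≤ 0 by omega]
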